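-- pv_equiv track=rewrite | github.com/nas-tya/prog | sr/prog6-sr/vsr 2.py | count_parity
-- ===== SOURCE A (Python) =====
-- def count_parity(str: str):
--     open_parenthesis, close_parenthesis = 0, 0
--     while len(str) > 0:
--         c = str[0]
--         str = str[1:]
--         if c == "(":
--             open_parenthesis += 1
--         elif c == ")":
--             close_parenthesis += 1
--         yield [open_parenthesis, close_parenthesis]
-- ===== SOURCE B (Python) =====
-- def count_parity(str):
--     # Build two independent prefix-count tables, then combine them in parallel.
--     opens = []
--     t = 0
--     for c in str:
--         if c == "(":
--             t += 1
--         opens.append(t)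
--     closes = []
--     t = 0
--     for c in str:
--         if c == ")":
--             t += 1
--         closes.append(t)
--     for o, c in zip(opens, closes):
--         yield [o, c]
-- ===== Notes on version B (the rewrite author's own statement) =====
-- stated objective: faster
-- what changed: Replaces A's interleaved scan with two scalar counters (which repeatedly reslices the string, making it quadratic) by three linear passes: build a prefix-count table for each paren kind, then zip them to emit each row.
import Mathlib
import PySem

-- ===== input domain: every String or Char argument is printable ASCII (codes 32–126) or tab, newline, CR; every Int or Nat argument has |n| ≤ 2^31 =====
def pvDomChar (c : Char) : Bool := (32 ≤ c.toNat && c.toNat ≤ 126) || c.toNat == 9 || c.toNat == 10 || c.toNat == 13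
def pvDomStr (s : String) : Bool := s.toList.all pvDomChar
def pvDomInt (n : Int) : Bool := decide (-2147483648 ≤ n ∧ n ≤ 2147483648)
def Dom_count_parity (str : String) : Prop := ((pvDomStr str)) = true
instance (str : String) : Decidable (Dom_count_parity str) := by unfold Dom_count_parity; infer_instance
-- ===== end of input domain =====

-- B builds two prefix-count tables and zips them instead of A's interleaved scan that reslices the string each step; objective: faster (A is quadratic in the string length, B linear).


-- ===== PORT A =====
-- while loop over the string: consume head, update counters, yield [open, close]
def countParityGo : List Char → Int → Int → List (List Int)
  | [], _, _ => []
  | c :: rest, o, cl =>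
    if c = '(' then [o + 1, cl] :: countParityGo rest (o + 1) cl
    else if c = ')' then [o, cl + 1] :: countParityGo rest o (cl + 1)
    else [o, cl] :: countParityGo rest o cl

def count_parity (str : String) : List (List Int) := countParityGo str.toList 0 0

-- ===== PORT B =====
-- running prefix-count table of character p, starting from accumulator t
def prefCounts (p : Char) : List Char → Int → List Int
  | [], _ => []
  | c :: rest, t =>
    let t' := t + (if c = p then 1 else 0)
    t' :: prefCounts p rest t'

def count_parity_alt (str : String) : List (List Int) :=
  ((prefCounts '(' str.toList 0).zip (prefCounts ')' str.toList 0)).map (fun x => [x.1, x.2])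

-- ===== PRECONDITION & SPEC =====
def Spec_count_parity (str : String) (out : List (List Int)) : Prop := out = count_parity_alt str
instance (str : String) (out : List (List Int)) : Decidable (Spec_count_parity str out) := by unfold Spec_count_parity; infer_instance

-- ===== CLAIM (what is proved, stated in full; the proofs are below) =====
def Claim_equal_count_parity : Prop := ∀ (str : String), Dom_count_parity str → Spec_count_parity str (count_parity str)

-- ===== LEMMAS AND PROOFS =====

-- ===== VERDICT (by name: the statement is the Claim_ definition above) =====
theorem countParityGo_eq (l : List Char) : ∀ o cl : Int,
    countParityGo l o cl
      = ((prefCounts '(' l o).zip (prefCounts ')' l cl)).map (fun x => [x.1, x.2]) := by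
  induction l with
  | nil => intro o cl; rfl
  | cons c rest ih =>
    intro o cl
    by_cases h1 : c = '('
    · simp [countParityGo, prefCounts, h1, ih]
    · by_cases h2 : c = ')'
      · simp [countParityGo, prefCounts, h1, h2, ih]
      · simp [countParityGo, prefCounts, h1, h2, ih]

theorem count_parity_spec : Claim_equal_count_parity := by
  intro s _
  unfold Spec_count_parity count_parity count_parity_alt
  exact countParityGo_eq s.toList 0 0
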